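-- pv_equiv track=rewrite | github.com/inhahe/fastpy | tests/regressions/annotated_programs.py | mixed_compute
-- ===== SOURCE A (Python) =====
-- def unchecked_int(x=0):
--     return int(x)
--
-- def checked_int(x=0):
--     return int(x)
--
-- def mixed_compute(n):
--     fast_acc = unchecked_int(0)     # raw speed, no checks
--     safe_acc = checked_int(0)       # overflow protection
--     i = 1
--     while i <= n:
--         fast_acc = fast_acc + i
--         safe_acc = safe_acc + i
--         i = i + 1
--     return fast_acc + safe_acc      # both contribute to result
-- ===== SOURCE B (Python) =====
-- def mixed_compute(n):
--     # closed form: both accumulators hold sum(1..n), so the result is 2*that = n*(n+1)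
--     if n < 1:
--         return 0
--     return n * (n + 1)
-- ===== Notes on version B (the rewrite author's own statement) =====
-- stated objective: faster
-- what changed: Replaced the O(n) accumulation loop with the closed-form product n*(n+1), twice the Gauss sum.
import Mathlib
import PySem

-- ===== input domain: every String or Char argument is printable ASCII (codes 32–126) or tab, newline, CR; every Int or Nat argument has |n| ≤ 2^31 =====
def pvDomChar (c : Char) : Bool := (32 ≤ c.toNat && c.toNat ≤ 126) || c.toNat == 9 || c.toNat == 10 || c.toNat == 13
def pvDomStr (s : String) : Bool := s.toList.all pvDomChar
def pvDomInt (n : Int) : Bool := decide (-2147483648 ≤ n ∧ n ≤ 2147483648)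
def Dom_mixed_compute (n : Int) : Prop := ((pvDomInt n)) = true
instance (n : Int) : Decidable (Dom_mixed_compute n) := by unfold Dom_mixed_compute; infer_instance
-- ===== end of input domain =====

-- B replaces A's O(n) while-loop with the closed form n*(n+1); objective: faster (asymptotic).

-- ===== PORT A =====
-- the while loop, state (fast_acc, safe_acc, i); fuel = remaining iterations (n+1-i).toNat,
-- a totality device only: the loop guard 'i ≤ n' is still checked each step as in the Python
def mcLoop (n : Int) : Nat → Int → Int → Int → Int
  | 0, fast, safe, _ => fast + safe
  | k + 1, fast, safe, i =>
      if i ≤ n then mcLoop n k (fast + i) (safe + i) (i + 1) else fast + safe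

def mixed_compute (n : Int) : Int :=
  mcLoop n n.toNat 0 0 1   -- fast_acc = int(0), safe_acc = int(0), i = 1; loop; return fast_acc + safe_acc

-- ===== PORT B =====
def mixed_compute_alt (n : Int) : Int :=
  if n < 1 then 0 else n * (n + 1)

-- ===== PRECONDITION & SPEC =====
def Spec_mixed_compute (n : Int) (out : Int) : Prop := out = mixed_compute_alt n
instance (n : Int) (out : Int) : Decidable (Spec_mixed_compute n out) := by unfold Spec_mixed_compute; infer_instance

-- ===== CLAIM (what is proved, stated in full; the proofs are below) =====
def Claim_equal_mixed_compute : Prop := ∀ (n : Int), Dom_mixed_compute n → Spec_mixed_compute n (mixed_compute n)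

-- ===== LEMMAS AND PROOFS =====

-- loop invariant: with fuel k = (n+1-i).toNat and i ≤ n+1, the loop returns the
-- accumulators plus 2 * sum(i..n) = n*(n+1) - i*(i-1)
theorem mcLoop_eq (n : Int) : ∀ (k : Nat) (i fast safe : Int),
    i ≤ n + 1 → (n + 1 - i).toNat = k →
    mcLoop n k fast safe i = fast + safe + (n * (n + 1) - i * (i - 1)) := by
  intro k
  induction k with
  | zero =>
      intro i fast safe hle hk
      have hi : i = n + 1 := by omega
      rw [mcLoop, hi]; ring
  | succ k ih =>
      intro i fast safe hle hk
      have hin : i ≤ n := by omega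
      rw [mcLoop, if_pos hin, ih (i + 1) _ _ (by omega) (by omega)]
      ring

-- ===== VERDICT (by name: the statement is the Claim_ definition above) =====
theorem mixed_compute_spec : Claim_equal_mixed_compute := by
  intro n _
  unfold Spec_mixed_compute mixed_compute mixed_compute_alt
  by_cases h : n < 1
  · have h0 : n.toNat = 0 := by omega
    rw [h0, mcLoop, if_pos h]
    norm_num
  · rw [mcLoop_eq n n.toNat 1 0 0 (by omega) (by omega), if_neg h]
    ring
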